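-- pv_equiv track=rewrite | github.com/SsyHow/Codeforces2 | 1760e/main.py | calc
-- ===== SOURCE A (Python) =====
-- def calc(L):
--     ans = one = 0
--     for i in L:
--         if i == 1:
--             one += 1
--         else:
--             ans += one
--     return ans
-- ===== SOURCE B (Python) =====
-- def calc(L):
--     # Divide and conquer: for a segment return (pairs, ones, non_ones);
--     # pairs across the split are (#1s in left) * (#non-1s in right).
--     def go(seg):
--         if not seg:
--             return (0, 0, 0)
--         if len(seg) == 1:
--             return (0, 1, 0) if seg[0] == 1 else (0, 0, 1)
--         mid = len(seg) // 2
--         a1, o1, n1 = go(seg[:mid])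
--         a2, o2, n2 = go(seg[mid:])
--         return (a1 + a2 + o1 * n2, o1 + o2, n1 + n2)
--     return go(L)[0]
-- ===== Notes on version B (the rewrite author's own statement) =====
-- stated objective: alternative
-- what changed: Replaces the single forward counting pass by a divide-and-conquer recursion (inversion-count style): each half returns (pairs, #1s, #non-1s) and cross pairs are counted as ones_left * non_ones_right.
import Mathlib
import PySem

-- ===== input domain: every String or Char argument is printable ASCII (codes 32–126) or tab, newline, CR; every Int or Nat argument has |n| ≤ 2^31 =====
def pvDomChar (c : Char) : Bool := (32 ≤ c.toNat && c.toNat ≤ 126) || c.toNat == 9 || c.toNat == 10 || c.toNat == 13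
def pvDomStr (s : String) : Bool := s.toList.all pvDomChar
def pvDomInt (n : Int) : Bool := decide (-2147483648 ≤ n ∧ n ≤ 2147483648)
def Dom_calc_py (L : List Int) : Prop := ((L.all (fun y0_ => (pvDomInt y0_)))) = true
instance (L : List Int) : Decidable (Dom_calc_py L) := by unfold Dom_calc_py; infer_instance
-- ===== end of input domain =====

-- B replaces the single counting pass by a divide-and-conquer recursion (alternative algorithm, same results).
-- ===== PORT A =====
-- forward pass: state (ans, one); at 1 increment `one`, otherwise add `one` to `ans`
def calc_py (L : List Int) : Int :=
  (L.foldl (fun s i => if i == 1 then (s.1, s.2 + 1) else (s.1 + s.2, s.2))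
    ((0 : Int), (0 : Int))).1

-- ===== PORT B =====
-- divide and conquer on the segment: (pairs, #1s, #non-1s); cross pairs = ones_left * non_ones_right
def calcGo : List Int → Int × Int × Int
  | [] => (0, 0, 0)
  | [x] => if x == 1 then (0, 1, 0) else (0, 0, 1)
  | x :: y :: rest =>
    let mid := (x :: y :: rest).length / 2
    let r1 := calcGo ((x :: y :: rest).take mid)
    let r2 := calcGo ((x :: y :: rest).drop mid)
    (r1.1 + r2.1 + r1.2.1 * r2.2.2, r1.2.1 + r2.2.1, r1.2.2 + r2.2.2)
termination_by L => L.length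
decreasing_by
  · simp [List.length_take]; omega
  · simp; omega

def calc_py_alt (L : List Int) : Int := (calcGo L).1

-- ===== PRECONDITION & SPEC =====
def Spec_calc_py (L : List Int) (out : Int) : Prop := out = calc_py_alt L
instance (L : List Int) (out : Int) : Decidable (Spec_calc_py L out) := by unfold Spec_calc_py; infer_instance

-- ===== CLAIM (what is proved, stated in full; the proofs are below) =====
def Claim_equal_calc_py : Prop := ∀ (L : List Int), Dom_calc_py L → Spec_calc_py L (calc_py L)

-- ===== LEMMAS AND PROOFS =====

def onesCnt : List Int → Int
  | [] => 0
  | x :: xs => (if x == 1 then 1 else 0) + onesCnt xs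

def non1Cnt : List Int → Int
  | [] => 0
  | x :: xs => (if x == 1 then 0 else 1) + non1Cnt xs

-- A's fold from an arbitrary start state
theorem foldA_shift (xs : List Int) (a o : Int) :
    xs.foldl (fun s i => if i == 1 then (s.1, s.2 + 1) else (s.1 + s.2, s.2)) (a, o)
      = (a + o * non1Cnt xs + calc_py xs, o + onesCnt xs) := by
  induction xs generalizing a o with
  | nil => simp [calc_py, onesCnt, non1Cnt]
  | cons x xs ih =>
    by_cases hx : x = 1
    · simp only [calc_py, List.foldl_cons, hx, onesCnt, non1Cnt, beq_self_eq_true, if_true]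
      rw [ih a (o + 1), ih 0 (0 + 1)]
      simp only [Prod.mk.injEq]
      constructor <;> ring
    · have hb : (x == 1) = false := by simp [hx]
      simp only [calc_py, List.foldl_cons, onesCnt, non1Cnt, hb, Bool.false_eq_true, if_false]
      rw [ih (a + o) o, ih (0 + 0) 0]
      simp only [Prod.mk.injEq]
      constructor <;> ring

theorem calcA_append (xs ys : List Int) :
    calc_py (xs ++ ys) = calc_py xs + calc_py ys + onesCnt xs * non1Cnt ys := by
  unfold calc_py
  rw [List.foldl_append, foldA_shift xs 0 0, foldA_shift ys (0 + 0 * non1Cnt xs + calc_py xs) (0 + onesCnt xs)]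
  unfold calc_py
  ring

theorem ones_append (xs ys : List Int) : onesCnt (xs ++ ys) = onesCnt xs + onesCnt ys := by
  induction xs with
  | nil => simp [onesCnt]
  | cons x xs ih => simp [onesCnt, ih]; ring

theorem non1_append (xs ys : List Int) : non1Cnt (xs ++ ys) = non1Cnt xs + non1Cnt ys := by
  induction xs with
  | nil => simp [non1Cnt]
  | cons x xs ih => simp [non1Cnt, ih]; ring

theorem calcGo_eq (L : List Int) : calcGo L = (calc_py L, onesCnt L, non1Cnt L) := by
  induction L using calcGo.induct with
  | case1 => simp [calcGo, calc_py, onesCnt, non1Cnt]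
  | case2 x hx => simp [calcGo, calc_py, onesCnt, non1Cnt, eq_of_beq hx]
  | case3 x hx =>
    have h : ¬ x = 1 := by simpa using hx
    simp [calcGo, calc_py, onesCnt, non1Cnt, h]
  | case4 x y rest mid ih1 ih2 =>
    rw [calcGo]
    simp only at ih1 ih2 ⊢
    rw [ih1, ih2]
    conv_rhs => rw [← List.take_append_drop ((x :: y :: rest).length / 2) (x :: y :: rest)]
    rw [calcA_append, ones_append, non1_append]

-- ===== VERDICT (by name: the statement is the Claim_ definition above) =====
theorem calc_py_spec : Claim_equal_calc_py := by
  intro L _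
  unfold Spec_calc_py calc_py_alt
  rw [calcGo_eq]
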